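-- pv_equiv track=rewrite | github.com/leoblum/telegram-db-parser | messages.py | deduplicate_dict_key
-- ===== SOURCE A (Python) =====
-- def deduplicate_dict_key(dict_, key_):
--     if key_ not in dict_:
--         return key_
--
--     key_ = key_.split(' ')
--     try:
--         num_ = int(key_[-1], 10)
--         key_[-1] = str(num_ + 1)
--     except Exception:
--         key_.append(str(1))
--
--     return deduplicate_dict_key(dict_, ' '.join(key_))
-- ===== SOURCE B (Python) =====
-- def deduplicate_dict_key(dict_, key_):
--     while key_ in dict_:
--         parts = key_.split(' ')
--         last = parts.pop()
--         try:
--             parts.append(str(int(last, 10) + 1))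
--         except Exception:
--             parts += [last, '1']
--         key_ = ' '.join(parts)
--     return key_
-- ===== Notes on version B (the rewrite author's own statement) =====
-- stated objective: idiomatic
-- what changed: Replaces A's tail recursion with an iterative while-loop whose body pops the last token and appends the bumped (or original-plus-'1') token, so deduplication runs in constant stack space instead of one Python stack frame per collision.
import Mathlib
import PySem

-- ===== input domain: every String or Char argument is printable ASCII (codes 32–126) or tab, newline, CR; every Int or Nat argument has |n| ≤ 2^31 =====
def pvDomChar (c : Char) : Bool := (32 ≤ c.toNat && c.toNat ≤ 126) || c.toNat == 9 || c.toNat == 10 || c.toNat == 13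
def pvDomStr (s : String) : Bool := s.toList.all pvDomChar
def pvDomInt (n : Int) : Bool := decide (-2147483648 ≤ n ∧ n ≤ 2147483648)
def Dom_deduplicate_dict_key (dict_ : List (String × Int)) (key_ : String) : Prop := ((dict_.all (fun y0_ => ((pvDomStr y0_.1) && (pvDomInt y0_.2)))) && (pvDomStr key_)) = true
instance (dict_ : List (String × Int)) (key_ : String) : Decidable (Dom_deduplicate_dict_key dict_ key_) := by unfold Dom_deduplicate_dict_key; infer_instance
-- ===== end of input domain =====

-- B replaces A's recursion with an iterative while-loop that pops the last token (same results, no call-stack growth).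


-- ===== PORT A =====
-- A's recursion, run on a fuel counter: dict_.length + 1 membership checks always suffice
-- (each recursive step strictly increases the trailing number, so the visited keys are distinct).
def pvDedupGoA (dict_ : List (String × Int)) : Nat → String → String
  | 0, key_ => key_   -- fuel guard only; never reached for fuel = dict_.length + 1
  | fuel+1, key_ =>
    if (dict_.any (fun kv => kv.1 == key_)) = false then key_   -- 'if key_ not in dict_: return key_'
    else
      -- key_ = key_.split(' '); try: num_ = int(key_[-1], 10); key_[-1] = str(num_ + 1)
      -- except Exception: key_.append(str(1));  return deduplicate_dict_key(dict_, ' '.join(key_))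
      let parts := PySem.Chars.splitOn key_.toList [' ']
      let next :=
        match PySem.Int.ofCharsBase? ((PySem.List.pyGet? parts (-1)).getD []) 10 with
        | some num_ => parts.dropLast ++ [PySem.Int.toChars (num_ + 1)]
        | none => parts ++ [PySem.Int.toChars 1]
      -- parts is never [] (split always yields ≥ 1 piece), so the IndexError of parts[-1] is unreachable; .getD [] is a placeholder
      pvDedupGoA dict_ fuel (String.ofList (PySem.Chars.join [' '] next))

def deduplicate_dict_key (dict_ : List (String × Int)) (key_ : String) : String :=
  pvDedupGoA dict_ (dict_.length + 1) key_

-- ===== PORT B =====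
-- one loop body of B's while-loop: split, pop the last token, bump or append, re-join
def pvBumpKey (key_ : String) : String :=
  let parts := PySem.Chars.splitOn key_.toList [' ']            -- parts = key_.split(' ')
  let last := (PySem.List.pyGet? parts (-1)).getD []            -- last = parts.pop()  (split never yields [])
  let rest := parts.dropLast
  let parts' :=
    match PySem.Int.ofCharsBase? last 10 with                   -- try: int(last, 10)
    | some n => rest ++ [PySem.Int.toChars (n + 1)]             -- parts.append(str(n + 1))
    | none => rest ++ [last, ['1']]                             -- parts += [last, '1']
  String.ofList (PySem.Chars.join [' '] parts')                     -- key_ = ' '.join(parts)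

-- 'while key_ in dict_:' on a fuel counter (dict_.length + 1 checks always suffice, as for A)
def pvWhileB (dict_ : List (String × Int)) : Nat → String → String
  | 0, key_ => key_
  | fuel+1, key_ =>
    if dict_.any (fun kv => kv.1 == key_) then pvWhileB dict_ fuel (pvBumpKey key_) else key_

def deduplicate_dict_key_alt (dict_ : List (String × Int)) (key_ : String) : String :=
  pvWhileB dict_ (dict_.length + 1) key_

-- ===== PRECONDITION & SPEC =====
def Spec_deduplicate_dict_key (dict_ : List (String × Int)) (key_ : String) (out : String) : Prop := out = deduplicate_dict_key_alt dict_ key_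
instance (dict_ : List (String × Int)) (key_ : String) (out : String) : Decidable (Spec_deduplicate_dict_key dict_ key_ out) := by unfold Spec_deduplicate_dict_key; infer_instance

-- ===== CLAIM (what is proved, stated in full; the proofs are below) =====
def Claim_equal_deduplicate_dict_key : Prop := ∀ (dict_ : List (String × Int)) (key_ : String), Dom_deduplicate_dict_key dict_ key_ → Spec_deduplicate_dict_key dict_ key_ (deduplicate_dict_key dict_ key_)

-- ===== LEMMAS AND PROOFS =====

-- split never returns the empty list (its worker always ends by reversing a cons)
theorem pvSplitGo_ne_nil (sep : List Char) (fuel : Nat) :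
    ∀ (l cur : List Char) (acc : List (List Char)), PySem.Chars.splitOn.go sep fuel l cur acc ≠ [] := by
  induction fuel with
  | zero =>
    intro l cur acc
    rw [PySem.Chars.splitOn.go]
    simp
  | succ n ih =>
    intro l cur acc
    cases l with
    | nil =>
      rw [PySem.Chars.splitOn.go]
      simp
      omega
    | cons c rest =>
      rw [PySem.Chars.splitOn.go]
      split
      · exact ih _ _ _
      · exact ih _ _ _

theorem pvSplitOn_ne_nil (s sep : List Char) : PySem.Chars.splitOn s sep ≠ [] := by
  unfold PySem.Chars.splitOn
  exact pvSplitGo_ne_nil _ _ _ _ _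

-- A's loop body and B's loop body produce the same next key
theorem pvStep_eq (dict_ : List (String × Int)) (fuel : Nat) (key_ : String) :
    pvDedupGoA dict_ (fuel+1) key_ =
      if dict_.any (fun kv => kv.1 == key_) then pvDedupGoA dict_ fuel (pvBumpKey key_) else key_ := by
  have hne : PySem.Chars.splitOn key_.toList [' '] ≠ [] := pvSplitOn_ne_nil _ _
  rw [pvDedupGoA, pvBumpKey]
  cases h : dict_.any (fun kv => kv.1 == key_) with
  | false => simp
  | true =>
    simp only [Bool.true_eq_false, if_false, if_true]
    congr 2
    rw [PySem.List.pyGet?_neg_one]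
    rw [List.getLast?_eq_some_getLast hne]
    cases hp : PySem.Int.ofCharsBase? ((some ((PySem.Chars.splitOn key_.toList [' ']).getLast hne)).getD []) 10 with
    | some n => simp
    | none =>
      simp only []
      congr 1
      have := List.dropLast_append_getLast hne
      calc PySem.Chars.splitOn key_.toList [' '] ++ [PySem.Int.toChars 1]
          = ((PySem.Chars.splitOn key_.toList [' ']).dropLast ++ [(PySem.Chars.splitOn key_.toList [' ']).getLast hne]) ++ [PySem.Int.toChars 1] := by rw [this]
        _ = (PySem.Chars.splitOn key_.toList [' ']).dropLast ++ [(PySem.Chars.splitOn key_.toList [' ']).getLast hne, PySem.Int.toChars 1] := by simp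
        _ = (PySem.Chars.splitOn key_.toList [' ']).dropLast ++ [(PySem.Chars.splitOn key_.toList [' ']).getLast hne, ['1']] := by norm_num [PySem.Int.toChars]; decide

theorem pvGo_eq_while (dict_ : List (String × Int)) (fuel : Nat) :
    ∀ key_, pvDedupGoA dict_ fuel key_ = pvWhileB dict_ fuel key_ := by
  induction fuel with
  | zero => intro key_; rfl
  | succ n ih =>
    intro key_
    rw [pvStep_eq, pvWhileB]
    cases h : dict_.any (fun kv => kv.1 == key_) with
    | false => simp
    | true => simp [ih]

-- ===== VERDICT (by name: the statement is the Claim_ definition above) =====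
theorem deduplicate_dict_key_spec : Claim_equal_deduplicate_dict_key := by
  intro dict_ key_ _
  unfold Spec_deduplicate_dict_key deduplicate_dict_key deduplicate_dict_key_alt
  exact pvGo_eq_while dict_ (dict_.length + 1) key_
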